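-- pv_equiv track=rewrite | github.com/ppgranger/token-saving | src/chain_utils.py | split_chain
-- ===== SOURCE A (Python) =====
-- def split_chain(command: str) -> list[str]:
--     """Split a command string on unquoted ``&&`` and ``;`` into segments.
--
--     Respects single- and double-quoted strings so that e.g.
--     ``git commit -m "fix; done"`` is NOT split on the ``;``.
--     """
--     segments: list[str] = []
--     current: list[str] = []
--     i = 0
--     n = len(command)
--
--     while i < n:
--         ch = command[i]
--
--         # Skip over quoted strings
--         if ch in ("'", '"'):
--             quote = ch
--             current.append(ch)
--             i += 1
--             while i < n and command[i] != quote: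
--                 current.append(command[i])
--                 i += 1
--             if i < n:
--                 current.append(command[i])  # closing quote
--                 i += 1
--             continue
--
--         # Check for &&
--         if ch == "&" and i + 1 < n and command[i + 1] == "&":
--             seg = "".join(current).strip()
--             if seg:
--                 segments.append(seg)
--             current = []
--             i += 2
--             continue
--
--         # Check for ;
--         if ch == ";":
--             seg = "".join(current).strip()
--             if seg:
--                 segments.append(seg)
--             current = []
--             i += 1
--             continue
--
--         current.append(ch)
--         i += 1
--
--     seg = "".join(current).strip()
--     if seg:
--         segments.append(seg)
--
--     return segments
-- ===== SOURCE B (Python) =====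
-- def split_chain(command: str) -> list[str]:
--     """Two-phase splitter: one scan with a quote flag marks unquoted '&&'/';'
--     delimiters with a sentinel, then the marked string is split/stripped."""
--     marked = []
--     quote = None
--     i = 0
--     n = len(command)
--     while i < n:
--         ch = command[i]
--         if quote is not None:
--             if ch == quote:
--                 quote = None
--             marked.append(ch)
--             i += 1
--         elif ch == "'" or ch == '"':
--             quote = ch
--             marked.append(ch)
--             i += 1
--         elif ch == "&" and i + 1 < n and command[i + 1] == "&":
--             marked.append("\x00")
--             i += 2
--         elif ch == ";":
--             marked.append("\x00")
--             i += 1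
--         else:
--             marked.append(ch)
--             i += 1
--     parts = "".join(marked).split("\x00")
--     stripped = [p.strip() for p in parts]
--     return [s for s in stripped if s]
-- ===== Notes on version B (the rewrite author's own statement) =====
-- stated objective: alternative
-- what changed: A accumulates the current segment character by character in one loop with a nested quote-consuming inner while; B instead does two phases: a single quote-flag scan that replaces each unquoted delimiter (the double-ampersand operator or a semicolon) with a sentinel character, then a plain split-on-sentinel / strip / drop-empty pipeline.
import Mathlib
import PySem

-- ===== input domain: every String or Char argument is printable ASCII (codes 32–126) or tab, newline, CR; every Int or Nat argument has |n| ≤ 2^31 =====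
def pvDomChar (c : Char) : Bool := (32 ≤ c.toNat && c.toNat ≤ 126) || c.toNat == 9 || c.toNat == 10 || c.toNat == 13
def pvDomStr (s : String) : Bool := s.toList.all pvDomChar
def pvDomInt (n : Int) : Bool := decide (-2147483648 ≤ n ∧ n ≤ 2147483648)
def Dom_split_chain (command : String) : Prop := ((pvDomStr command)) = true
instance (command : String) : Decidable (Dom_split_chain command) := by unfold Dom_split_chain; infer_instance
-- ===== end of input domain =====

-- B replaces A's single accumulating loop (with a nested quote-consuming inner while)
-- by two phases: a quote-flag scan that marks unquoted delimiters with a sentinel,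
-- then a plain split/strip/filter of the marked string (objective: simpler).

-- ===== PORT A =====
-- segments.append("".join(current).strip()) if non-empty
def pushSegA (segs : List String) (cur : List Char) : List String :=
  let seg := PySem.Chars.strip cur
  if seg = [] then segs else segs ++ [String.mk seg]

-- A's while-loop; the inner quote-consuming while is the takeWhile/dropWhile pair
def loopA : List Char → List Char → List String → List String
  | [], cur, segs => pushSegA segs cur
  | ch :: rest, cur, segs =>
    if ch = '\'' ∨ ch = '"' then
      match _h : rest.dropWhile (· ≠ ch) with
      | [] => pushSegA segs (cur ++ ch :: rest.takeWhile (· ≠ ch))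
      | q :: rest' => loopA rest' (cur ++ ch :: rest.takeWhile (· ≠ ch) ++ [q]) segs
    else if ch = '&' ∧ rest.head? = some '&' then
      loopA rest.tail [] (pushSegA segs cur)
    else if ch = ';' then
      loopA rest [] (pushSegA segs cur)
    else
      loopA rest (cur ++ [ch]) segs
  termination_by l _ _ => l.length
  decreasing_by
  all_goals first
  | (have := List.length_dropWhile_le (p := (· ≠ ch)) (l := rest)
     rw [_h] at this
     simp only [List.length_cons] at this ⊢
     omega)
  | (simp only [List.length_tail, List.length_cons]; omega)
  | simp

def split_chain (command : String) : List String :=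
  loopA command.toList [] []

-- ===== PORT B =====
-- phase 1 of Source B: copy chars, tracking the open quote; unquoted "&&"/";" become '\x00'
def markB : Option Char → List Char → List Char
  | _, [] => []
  | some qc, ch :: rest => ch :: markB (if ch = qc then none else some qc) rest
  | none, ch :: rest =>
    if ch = '\'' ∨ ch = '"' then ch :: markB (some ch) rest
    else if ch = '&' ∧ rest.head? = some '&' then '\x00' :: markB none rest.tail
    else if ch = ';' then '\x00' :: markB none rest
    else ch :: markB none rest
  termination_by _ l => l.length
  decreasing_by all_goals (simp only [List.length_tail, List.length_cons]; omega)

-- phase 2 of Source B: [p.strip() for …] then drop the falsy ones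
def cleanB (parts : List (List Char)) : List String :=
  ((parts.map PySem.Chars.strip).filter (· ≠ [])).map String.mk

def split_chain_alt (command : String) : List String :=
  cleanB (PySem.Chars.splitOn (markB none command.toList) ['\x00'])

-- ===== PRECONDITION & SPEC =====
def Spec_split_chain (command : String) (out : List String) : Prop := out = split_chain_alt command
instance (command : String) (out : List String) : Decidable (Spec_split_chain command out) := by unfold Spec_split_chain; infer_instance

-- ===== CLAIM (what is proved, stated in full; the proofs are below) =====
def Claim_equal_split_chain : Prop := ∀ (command : String), Dom_split_chain command → Spec_split_chain command (split_chain command)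

-- ===== LEMMAS AND PROOFS =====

-- model of splitting a marked string on the sentinel
def splitNul : List Char → List (List Char)
  | [] => [[]]
  | c :: r =>
    if c = '\x00' then [] :: splitNul r
    else
      match splitNul r with
      | p :: ps => (c :: p) :: ps
      | [] => [[c]]

-- prepend a prefix onto the first part
def consHd (cur : List Char) : List (List Char) → List (List Char)
  | p :: ps => (cur ++ p) :: ps
  | [] => [cur]

theorem splitNul_ne_nil (s : List Char) : splitNul s ≠ [] := by
  cases s with
  | nil => simp [splitNul]
  | cons c r =>
    simp only [splitNul]
    split
    · simp
    · split <;> simp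

theorem consHd_nil (ps : List (List Char)) (h : ps ≠ []) : consHd [] ps = ps := by
  cases ps with
  | nil => exact absurd rfl h
  | cons p ps => simp [consHd]

theorem consHd_consHd (a b : List Char) (ps : List (List Char)) (h : ps ≠ []) :
    consHd a (consHd b ps) = consHd (a ++ b) ps := by
  cases ps with
  | nil => exact absurd rfl h
  | cons p ps => simp [consHd]

theorem go_spec (fuel : Nat) : ∀ (s cur : List Char) (acc : List (List Char)),
    s.length < fuel →
    PySem.Chars.splitOn.go ['\x00'] fuel s cur acc =
      acc.reverse ++ consHd cur.reverse (splitNul s) := by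
  induction fuel with
  | zero => intro s cur acc h; omega
  | succ n ih =>
    intro s cur acc h
    cases s with
    | nil =>
      simp [PySem.Chars.splitOn.go, splitNul, consHd]
    | cons c rest =>
      simp only [PySem.Chars.splitOn.go]
      by_cases hc : c = '\x00'
      · subst hc
        have hp : ['\x00'].isPrefixOf ('\x00' :: rest) = true := by
          simp [List.isPrefixOf]
        rw [if_pos hp]
        have : rest.length < n := by simp only [List.length_cons] at h; omega
        rw [ih _ _ _ (by simpa using this)]
        have h1 : splitNul ('\x00' :: rest) = [] :: splitNul rest := by simp [splitNul]
        rw [h1]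
        cases hsr : splitNul rest with
        | nil => exact absurd hsr (splitNul_ne_nil rest)
        | cons p ps => simp [consHd, hsr]
      · have hp : ['\x00'].isPrefixOf (c :: rest) = false := by
          simp [List.isPrefixOf]
          exact fun h => hc h.symm
        rw [if_neg (by simp [hp])]
        have : rest.length < n := by simp only [List.length_cons] at h; omega
        rw [ih _ _ _ this]
        have hms : splitNul (c :: rest) =
            match splitNul rest with
            | p :: ps => (c :: p) :: ps
            | [] => [[c]] := by
          simp [splitNul, hc]
        rw [hms]
        cases hsr : splitNul rest with
        | nil => exact absurd hsr (splitNul_ne_nil rest)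
        | cons p ps => simp [consHd]

theorem splitOn_nul (s : List Char) :
    PySem.Chars.splitOn s ['\x00'] = splitNul s := by
  unfold PySem.Chars.splitOn
  rw [go_spec (s.length + 1) s [] [] (by omega)]
  simp [consHd_nil _ (splitNul_ne_nil s)]

theorem splitNul_append (p : List Char) : ∀ (s : List Char),
    (∀ a ∈ p, a ≠ '\x00') → splitNul (p ++ s) = consHd p (splitNul s) := by
  induction p with
  | nil => intro s _; simp [consHd_nil _ (splitNul_ne_nil s)]
  | cons c p' ih =>
    intro s hp
    have hc : c ≠ '\x00' := hp c (by simp)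
    have hrec : splitNul (c :: (p' ++ s)) =
        match splitNul (p' ++ s) with
        | q :: qs => (c :: q) :: qs
        | [] => [[c]] := by
      simp [splitNul, hc]
    simp only [List.cons_append, hrec, ih s (fun a ha => hp a (by simp [ha]))]
    cases hs : splitNul s with
    | nil => exact absurd hs (splitNul_ne_nil s)
    | cons q qs => simp [consHd]

theorem mark_quote (rest : List Char) (qc : Char) :
    markB (some qc) rest =
      rest.takeWhile (· ≠ qc) ++
        (match rest.dropWhile (· ≠ qc) with
         | [] => []
         | q :: r => q :: markB none r) := by
  induction rest with
  | nil => simp [markB]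
  | cons c rest ih =>
    by_cases hc : c = qc
    · subst hc
      simp [markB]
    · simp [markB, hc, List.takeWhile_cons, ih]

theorem cleanB_cons (p : List Char) (ps : List (List Char)) :
    cleanB (p :: ps) =
      (if PySem.Chars.strip p = [] then [] else [String.mk (PySem.Chars.strip p)]) ++ cleanB ps := by
  simp only [cleanB, List.map_cons, List.filter_cons]
  split_ifs with h <;> simp_all

theorem loopA_eq (n : Nat) : ∀ (rest cur : List Char) (segs : List String),
    rest.length ≤ n → (∀ a ∈ rest, a ≠ '\x00') →
    loopA rest cur segs = segs ++ cleanB (consHd cur (splitNul (markB none rest))) := by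
  induction n with
  | zero =>
    intro rest cur segs hn _
    have : rest = [] := List.length_eq_zero_iff.mp (by omega)
    subst this
    have hc : consHd cur (splitNul (markB none [])) = [cur] := by
      simp [markB, splitNul, consHd]
    rw [hc, cleanB_cons]
    simp only [loopA, pushSegA, cleanB, List.map_nil, List.filter_nil, List.append_nil]
    split <;> simp_all
  | succ n ih =>
    intro rest cur segs hn hnul
    cases rest with
    | nil =>
      have hc : consHd cur (splitNul (markB none [])) = [cur] := by
        simp [markB, splitNul, consHd]
      rw [hc, cleanB_cons]
      simp only [loopA, pushSegA, cleanB, List.map_nil, List.filter_nil, List.append_nil]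
      split <;> simp_all
    | cons ch rst =>
      have hch : ch ≠ '\x00' := hnul ch (by simp)
      have hrst : ∀ a ∈ rst, a ≠ '\x00' := fun a ha => hnul a (by simp [ha])
      by_cases hq : ch = '\'' ∨ ch = '"'
      · -- quote branch
        rw [show markB none (ch :: rst) = ch :: markB (some ch) rst by
              simp [markB, hq]]
        rw [mark_quote rst ch]
        simp only [loopA]
        rw [if_pos hq]
        split
        next hd =>
          rw [hd]
          have htw : rst.takeWhile (· ≠ ch) = rst := by
            have := List.takeWhile_append_dropWhile (p := (· ≠ ch)) (l := rst)
            rw [hd] at this; simpa using this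
          have hall : ∀ a ∈ ch :: rst.takeWhile (· ≠ ch), a ≠ '\x00' := by
            intro a ha
            rcases List.mem_cons.mp ha with h | h
            · subst h; exact hch
            · exact hrst a ((List.takeWhile_sublist _).subset h)
          have hsp : splitNul (ch :: rst.takeWhile (· ≠ ch)) = [ch :: rst.takeWhile (· ≠ ch)] := by
            have := splitNul_append (ch :: rst.takeWhile (· ≠ ch)) [] hall
            simpa [splitNul, consHd] using this
          rw [show (match ([] : List Char) with
                    | [] => ([] : List Char)
                    | q :: r => q :: markB none r) = [] from rfl, List.append_nil]
          rw [hsp]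
          rw [show consHd cur [ch :: rst.takeWhile (· ≠ ch)] = [cur ++ ch :: rst.takeWhile (· ≠ ch)] by
                simp [consHd]]
          rw [cleanB_cons]
          simp only [pushSegA, cleanB, List.map_nil, List.filter_nil, List.append_nil]
          split <;> simp_all
        next q rst' hd =>
          rw [hd]
          have hq' : q = ch := by
            have hne : rst.dropWhile (· ≠ ch) ≠ [] := by rw [hd]; simp
            have h1 := List.head_dropWhile_not (fun x => decide (x ≠ ch)) hne
            have hd' := hd
            simp only [ne_eq, decide_not] at hd'
            simpa [hd'] using h1
          have hlen : rst'.length ≤ n := by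
            have := List.length_dropWhile_le (p := (· ≠ ch)) (l := rst)
            rw [hd] at this
            simp only [List.length_cons] at this hn; omega
          have hrst' : ∀ a ∈ rst', a ≠ '\x00' := by
            intro a ha
            exact hrst a ((List.dropWhile_sublist _).subset (by rw [hd]; exact List.mem_cons_of_mem _ ha))
          rw [ih rst' _ segs hlen hrst']
          have hall : ∀ a ∈ ch :: (rst.takeWhile (· ≠ ch) ++ [q]), a ≠ '\x00' := by
            intro a ha
            rcases List.mem_cons.mp ha with h | h
            · subst h; exact hch
            · rcases List.mem_append.mp h with h | h
              · exact hrst a ((List.takeWhile_sublist _).subset h)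
              · simp at h; subst h; subst hq'; exact hch
          rw [show (match (q :: rst' : List Char) with
                    | [] => ([] : List Char)
                    | q :: r => q :: markB none r) = q :: markB none rst' from rfl]
          rw [show ch :: (rst.takeWhile (· ≠ ch) ++ q :: markB none rst') =
                (ch :: (rst.takeWhile (· ≠ ch) ++ [q])) ++ markB none rst' by simp]
          rw [splitNul_append _ _ hall, consHd_consHd _ _ _ (splitNul_ne_nil _)]
          simp [List.append_assoc]
      · by_cases hamp : ch = '&' ∧ rst.head? = some '&'
        · -- && branch
          obtain ⟨hch', hhd⟩ := hamp
          rw [show markB none (ch :: rst) = '\x00' :: markB none rst.tail by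
                simp [markB, hq, hch', hhd]]
          rw [show loopA (ch :: rst) cur segs = loopA rst.tail [] (pushSegA segs cur) by
                simp [loopA, hq, hch', hhd]]
          have hlen : rst.tail.length ≤ n := by
            simp at hn ⊢; omega
          have htl : ∀ a ∈ rst.tail, a ≠ '\x00' := by
            intro a ha; exact hrst a (List.mem_of_mem_tail ha)
          rw [ih rst.tail [] _ hlen htl]
          rw [show splitNul ('\x00' :: markB none rst.tail) =
                [] :: splitNul (markB none rst.tail) by simp [splitNul]]
          rw [consHd_nil _ (splitNul_ne_nil _)]
          rw [show consHd cur ([] :: splitNul (markB none rst.tail)) =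
                cur :: splitNul (markB none rst.tail) by simp [consHd]]
          rw [cleanB_cons]
          simp only [pushSegA]
          split <;> simp_all
        · by_cases hsemi : ch = ';'
          · -- ; branch
            rw [show markB none (ch :: rst) = '\x00' :: markB none rst by
                  simp [markB, hq, hsemi]]
            rw [show loopA (ch :: rst) cur segs = loopA rst [] (pushSegA segs cur) by
                  simp [loopA, hq, hsemi]]
            rw [ih rst [] _ (by simp at hn; omega) hrst]
            rw [show splitNul ('\x00' :: markB none rst) =
                  [] :: splitNul (markB none rst) by simp [splitNul]]
            rw [consHd_nil _ (splitNul_ne_nil _)]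
            rw [show consHd cur ([] :: splitNul (markB none rst)) =
                  cur :: splitNul (markB none rst) by simp [consHd]]
            rw [cleanB_cons]
            simp only [pushSegA]
            split <;> simp_all
          · -- plain char
            rw [show markB none (ch :: rst) = ch :: markB none rst by
                  simp [markB, hq, hamp, hsemi]]
            rw [show loopA (ch :: rst) cur segs = loopA rst (cur ++ [ch]) segs by
                  simp [loopA, hq, hamp, hsemi]]
            rw [ih rst (cur ++ [ch]) segs (by simp at hn; omega) hrst]
            have : splitNul (ch :: markB none rst) =
                consHd [ch] (splitNul (markB none rst)) := by
              have := splitNul_append [ch] (markB none rst) (by simpa using hch)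
              simpa using this
            rw [this, consHd_consHd _ _ _ (splitNul_ne_nil _)]

-- ===== VERDICT (by name: the statement is the Claim_ definition above) =====
theorem split_chain_spec : Claim_equal_split_chain := by
  intro command hdom
  unfold Spec_split_chain split_chain split_chain_alt
  have hnul : ∀ a ∈ command.toList, a ≠ '\x00' := by
    intro a ha heq
    have := List.all_eq_true.mp hdom a ha
    subst heq
    simp [pvDomChar] at this
  rw [loopA_eq command.toList.length command.toList [] [] le_rfl hnul]
  rw [splitOn_nul, consHd_nil _ (splitNul_ne_nil _)]
  simp
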